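-- pv_equiv track=rewrite | github.com/g7gpr/RMS | Utils/IdentifyStars.py | sort2ListsOnFieldInList2
-- ===== SOURCE A (Python) =====
-- def sort2ListsOnFieldInList2(list_1, list_2, list_2_field_to_sort):
--     """
--
--     Arguments:
--         list_1: [list] List of data to be sorted based on a list in field 2
--         list_2: [list] List of data to be sorted based on a field in list 2
--         list_2_field_to_sort: [int] Field number to sort on
--
--     Returns:
--         sorted_list_1: [list] list_1 sorted on field in list 2
--         sorted_list_2: [list] list_2 sorted on field in list 2
--     """
--
--
--     sorting_list = []
--     for list_1_item, list_2_item in zip(list_1, list_2):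
--         sorting_list_entry = []
--         sorting_list_entry.append(list_1_item)
--         sorting_list_entry.append(list_2_item)
--         sorting_list.append(sorting_list_entry)
--
--     sorting_list.sort(key=lambda x: x[1][list_2_field_to_sort])
--
--     sorted_list_1, sorted_list_2 = [], []
--     for list_1_item, list_2_item in sorting_list:
--         sorted_list_1.append(list_1_item)
--         sorted_list_2.append(list_2_item)
--
--
--     return sorted_list_1, sorted_list_2
-- ===== SOURCE B (Python) =====
-- def sort2ListsOnFieldInList2(list_1, list_2, list_2_field_to_sort):
--     # One-pass online stable insertion sort: keep the paired rows sorted at all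
--     # times, inserting each new pair after any equal-key pairs (stability).
--     pairs = []
--     for item_1, item_2 in zip(list_1, list_2):
--         k = item_2[list_2_field_to_sort]
--         i = 0
--         while i < len(pairs) and not (k < pairs[i][1][list_2_field_to_sort]):
--             i += 1
--         pairs.insert(i, (item_1, item_2))
--     return [p[0] for p in pairs], [p[1] for p in pairs]
-- ===== Notes on version B (the rewrite author's own statement) =====
-- stated objective: alternative
-- what changed: B maintains a sorted list incrementally with a one-pass stable insertion sort (insert each zipped pair after its equal keys) instead of packing all pairs and calling list.sort afterwards; stability of insertion-after-equals makes it agree with Python's stable sort.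
import Mathlib
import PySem

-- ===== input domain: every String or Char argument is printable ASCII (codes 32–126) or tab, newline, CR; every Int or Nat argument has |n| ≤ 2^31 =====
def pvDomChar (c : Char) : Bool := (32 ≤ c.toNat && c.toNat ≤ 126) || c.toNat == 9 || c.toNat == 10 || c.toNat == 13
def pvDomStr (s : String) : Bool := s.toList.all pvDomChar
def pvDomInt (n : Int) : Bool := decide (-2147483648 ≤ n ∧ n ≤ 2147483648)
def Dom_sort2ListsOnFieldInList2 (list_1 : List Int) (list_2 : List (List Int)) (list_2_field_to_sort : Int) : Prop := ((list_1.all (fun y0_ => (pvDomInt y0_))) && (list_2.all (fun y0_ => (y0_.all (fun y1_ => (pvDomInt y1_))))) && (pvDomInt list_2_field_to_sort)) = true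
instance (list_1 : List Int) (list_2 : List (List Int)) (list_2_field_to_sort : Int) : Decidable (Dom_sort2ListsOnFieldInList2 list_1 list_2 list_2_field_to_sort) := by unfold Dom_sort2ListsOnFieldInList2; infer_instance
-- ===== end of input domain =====

-- B replaces A's collect-all / list.sort / unpack by a one-pass online stable
-- insertion sort: each zipped pair is inserted after its equal keys as it arrives.

-- ===== PORT A =====
-- the 2-element Python list [list_1_item, list_2_item] is heterogeneous; it is ported as a pair
def sort2ListsOnFieldInList2 (list_1 : List Int) (list_2 : List (List Int)) (list_2_field_to_sort : Int) : List Int × List (List Int) :=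
  let sorting_list : List (Int × List Int) :=
    (list_1.zip list_2).foldl (fun acc p => acc ++ [(p.1, p.2)]) []
  -- x[1][list_2_field_to_sort] raises IndexError out of range — those inputs are outside Pre_; the default 0 is unreached there
  let sorting_list := PySem.List.sorted sorting_list (fun x => PySem.List.pyGetD x.2 list_2_field_to_sort 0)
  sorting_list.foldl (fun (acc : List Int × List (List Int)) p => (acc.1 ++ [p.1], acc.2 ++ [p.2])) ([], [])

-- ===== PORT B =====
-- Source B's while-scan + pairs.insert(i, …), written as the obvious structural recursion:
-- walk past every element whose key is not greater than k, then place the pair there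
def pvInsertPair (f : Int) (pairs : List (Int × List Int)) (pair : Int × List Int) : List (Int × List Int) :=
  match pairs with
  | [] => [pair]
  | p :: t =>
      if !(decide (PySem.List.pyGetD pair.2 f 0 < PySem.List.pyGetD p.2 f 0)) then
        p :: pvInsertPair f t pair
      else
        pair :: p :: t

def sort2ListsOnFieldInList2_alt (list_1 : List Int) (list_2 : List (List Int)) (list_2_field_to_sort : Int) : List Int × List (List Int) :=
  let pairs := (list_1.zip list_2).foldl (pvInsertPair list_2_field_to_sort) []
  (pairs.map (fun p => p.1), pairs.map (fun p => p.2))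

-- ===== PRECONDITION & SPEC =====
-- Pre_: the sort key indexes each zipped row of list_2 at list_2_field_to_sort; where that
-- index is out of range (Python IndexError) both A and B raise, so those inputs are excluded.
def Pre_sort2ListsOnFieldInList2 (list_1 : List Int) (list_2 : List (List Int)) (list_2_field_to_sort : Int) : Prop :=
  ∀ row ∈ list_2.take (min list_1.length list_2.length),
    (PySem.List.pyGet? row list_2_field_to_sort).isSome = true
instance (list_1 : List Int) (list_2 : List (List Int)) (list_2_field_to_sort : Int) : Decidable (Pre_sort2ListsOnFieldInList2 list_1 list_2 list_2_field_to_sort) := by unfold Pre_sort2ListsOnFieldInList2; infer_instance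
def pvWitness_sort2ListsOnFieldInList2 : List Int × List (List Int) × Int := ([10, 20, 30], [[3], [1], [2]], 0)

def Spec_sort2ListsOnFieldInList2 (list_1 : List Int) (list_2 : List (List Int)) (list_2_field_to_sort : Int) (out : List Int × List (List Int)) : Prop := out = sort2ListsOnFieldInList2_alt list_1 list_2 list_2_field_to_sort
instance (list_1 : List Int) (list_2 : List (List Int)) (list_2_field_to_sort : Int) (out : List Int × List (List Int)) : Decidable (Spec_sort2ListsOnFieldInList2 list_1 list_2 list_2_field_to_sort out) := by unfold Spec_sort2ListsOnFieldInList2; infer_instance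

-- ===== CLAIM (what is proved, stated in full; the proofs are below) =====
def Claim_equal_sort2ListsOnFieldInList2 : Prop := ∀ (list_1 : List Int) (list_2 : List (List Int)) (list_2_field_to_sort : Int), Dom_sort2ListsOnFieldInList2 list_1 list_2 list_2_field_to_sort → Pre_sort2ListsOnFieldInList2 list_1 list_2 list_2_field_to_sort → Spec_sort2ListsOnFieldInList2 list_1 list_2 list_2_field_to_sort (sort2ListsOnFieldInList2 list_1 list_2 list_2_field_to_sort)

-- ===== LEMMAS AND PROOFS =====

-- B's linear-scan insertion is PySem's insertBy with A's key as strict comparator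
theorem pv_insertPair_eq_insertBy (f : Int) (pairs : List (Int × List Int)) (pair : Int × List Int) :
    pvInsertPair f pairs pair
      = PySem.List.insertBy
          (fun a b => decide ((PySem.List.pyGetD a.2 f 0 : Int) < PySem.List.pyGetD b.2 f 0))
          pair pairs := by
  induction pairs with
  | nil => rfl
  | cons p t ih =>
      simp only [pvInsertPair, PySem.List.insertBy]
      by_cases h : (PySem.List.pyGetD pair.2 f 0 : Int) < PySem.List.pyGetD p.2 f 0
      · simp [h]
      · simp [h, ih]

-- A's pack loop is the identity on the zipped list
theorem pv_pack_foldl (l : List (Int × List Int)) :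
    l.foldl (fun acc p => acc ++ [(p.1, p.2)]) [] = l := by
  have h : ∀ (l : List (Int × List Int)) (a : List (Int × List Int)),
      l.foldl (fun acc p => acc ++ [(p.1, p.2)]) a = a ++ l := by
    intro l
    induction l with
    | nil => simp
    | cons p t ih => intro a; simp [ih]
  simpa using h l []

-- A's unpack loop is (map fst, map snd)
theorem pv_unzip_foldl (l : List (Int × List Int)) (a : List Int) (b : List (List Int)) :
    l.foldl (fun (acc : List Int × List (List Int)) p => (acc.1 ++ [p.1], acc.2 ++ [p.2])) (a, b)
      = (a ++ l.map Prod.fst, b ++ l.map Prod.snd) := by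
  induction l generalizing a b with
  | nil => simp
  | cons p t ih => simp [ih]

-- ===== VERDICT (by name: the statement is the Claim_ definition above) =====
theorem sort2ListsOnFieldInList2_spec : Claim_equal_sort2ListsOnFieldInList2 := by
  intro list_1 list_2 f _hDom _hPre
  unfold Spec_sort2ListsOnFieldInList2 sort2ListsOnFieldInList2 sort2ListsOnFieldInList2_alt
  have hfun : pvInsertPair f = (fun acc x =>
      PySem.List.insertBy (fun a b => decide ((PySem.List.pyGetD a.2 f 0 : Int) < PySem.List.pyGetD b.2 f 0)) x acc) :=
    funext fun acc => funext fun x => pv_insertPair_eq_insertBy f acc x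
  simp only [pv_pack_foldl, PySem.List.sorted_eq_foldl_insertBy, hfun, pv_unzip_foldl,
    List.nil_append]
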